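-- pv_equiv track=rewrite | github.com/brubsby/rs3xpsolver | solver.py | get_fields_without_data
-- ===== SOURCE A (Python) =====
-- def get_fields_without_data(fields_to_verify, data_points):
--     field_set = set(fields_to_verify)
--     for data_point in data_points:
--         for field in list(field_set):
--             if data_point['boost_vals'][field] > 0:
--                 field_set.remove(field)
--                 if len(field_set) == 0:
--                     return []
--     return list(field_set)
-- ===== SOURCE B (Python) =====
-- def get_fields_without_data(fields_to_verify, data_points):
--     candidates = set(fields_to_verify)
--     return [field for field in candidates
--             if not any(data_point['boost_vals'][field] > 0 for data_point in data_points)]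
-- ===== Notes on version B (the rewrite author's own statement) =====
-- stated objective: simpler
-- what changed: B replaces A's data-point-outer loop that incrementally removes fields from a mutable working set (with an early-empty return) by a single field-outer comprehension that keeps a field iff no data point has a positive boost value for it, short-circuiting per field with any().
import Mathlib
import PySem

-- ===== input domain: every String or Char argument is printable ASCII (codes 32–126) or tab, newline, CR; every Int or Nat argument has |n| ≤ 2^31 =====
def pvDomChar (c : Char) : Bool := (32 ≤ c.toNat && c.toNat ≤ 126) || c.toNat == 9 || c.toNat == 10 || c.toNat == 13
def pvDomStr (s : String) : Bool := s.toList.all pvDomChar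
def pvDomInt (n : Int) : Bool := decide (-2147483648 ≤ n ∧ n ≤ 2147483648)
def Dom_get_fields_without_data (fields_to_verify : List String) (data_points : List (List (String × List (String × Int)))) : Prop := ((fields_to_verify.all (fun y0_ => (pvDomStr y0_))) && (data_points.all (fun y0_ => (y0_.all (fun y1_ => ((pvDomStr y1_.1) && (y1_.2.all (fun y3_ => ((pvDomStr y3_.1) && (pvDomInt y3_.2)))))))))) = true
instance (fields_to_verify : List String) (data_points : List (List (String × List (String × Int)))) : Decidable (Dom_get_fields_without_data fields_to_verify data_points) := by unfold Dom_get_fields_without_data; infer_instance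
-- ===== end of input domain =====

-- B replaces A's data-point-outer loop with incremental set removal by a field-outer filter
-- ("keep a field iff no data point gives it a positive boost"); same value on every input where A returns.

-- data_point['boost_vals'][field]; the defaults are never used under Pre_ (both keys present there)
def pvBoostVal (data_point : List (String × List (String × Int))) (field : String) : Int :=
  (PySem.Dict.mk ((PySem.Dict.mk data_point).getD "boost_vals" [])).getD field 0

-- ===== PORT A =====
-- inner loop 'for field in list(field_set)' over the snapshot, mutating the set; none = the early 'return []'.
-- field_set.remove(field) is Set.discard: field comes from the Nodup snapshot and is still in field_set there.
def pvInnerA (data_point : List (String × List (String × Int))) :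
    List String → PySem.Set String → Option (PySem.Set String)
  | [], s => some s
  | field :: rest, s =>
    if 0 < pvBoostVal data_point field then
      let s' := PySem.Set.discard s field
      if PySem.Set.len s' = 0 then none else pvInnerA data_point rest s'
    else pvInnerA data_point rest s

def pvOuterA : List (List (String × List (String × Int))) → PySem.Set String → List String
  | [], s => s
  | data_point :: rest, s =>
    match pvInnerA data_point s s with
    | none => []
    | some s' => pvOuterA rest s'

def get_fields_without_data (fields_to_verify : List String) (data_points : List (List (String × List (String × Int)))) : List String :=
  pvOuterA data_points (PySem.Set.ofList fields_to_verify)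

-- ===== PORT B =====
def get_fields_without_data_alt (fields_to_verify : List String) (data_points : List (List (String × List (String × Int)))) : List String :=
  (PySem.Set.ofList fields_to_verify).filter
    (fun field => !(data_points.any (fun data_point => decide (0 < pvBoostVal data_point field))))

-- ===== PRECONDITION & SPEC =====
-- field f is still in A's working set when data_points[j] (j < i) have no positive boost for it
def pvLive (data_points : List (List (String × List (String × Int)))) (f : String) (i : Nat) : Bool :=
  (List.range i).all (fun j => decide (pvBoostVal (data_points.getD j []) f ≤ 0))

-- Pre_ = exactly the inputs where A returns: at each data point that A still reads (some field live),
-- 'boost_vals' exists and contains every live field; elsewhere A hits a KeyError.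
def Pre_get_fields_without_data (fields_to_verify : List String) (data_points : List (List (String × List (String × Int)))) : Prop :=
  ∀ i < data_points.length,
    (∃ f ∈ fields_to_verify, pvLive data_points f i = true) →
      ((PySem.Dict.mk (data_points.getD i [])).contains "boost_vals" = true ∧
       ∀ f ∈ fields_to_verify, pvLive data_points f i = true →
         (PySem.Dict.mk ((PySem.Dict.mk (data_points.getD i [])).getD "boost_vals" [])).contains f = true)
instance (fields_to_verify : List String) (data_points : List (List (String × List (String × Int)))) : Decidable (Pre_get_fields_without_data fields_to_verify data_points) := by unfold Pre_get_fields_without_data; infer_instance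

def pvWitness_get_fields_without_data : List String × (List (List (String × List (String × Int)))) :=
  (["hp", "str"], [[("boost_vals", [("hp", 5), ("str", 0)])], [("boost_vals", [("hp", -1), ("str", 0)])]])

def Spec_get_fields_without_data (fields_to_verify : List String) (data_points : List (List (String × List (String × Int)))) (out : List String) : Prop := out = get_fields_without_data_alt fields_to_verify data_points
instance (fields_to_verify : List String) (data_points : List (List (String × List (String × Int)))) (out : List String) : Decidable (Spec_get_fields_without_data fields_to_verify data_points out) := by unfold Spec_get_fields_without_data; infer_instance

-- ===== CLAIM (what is proved, stated in full; the proofs are below) =====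
def Claim_equal_get_fields_without_data : Prop := ∀ (fields_to_verify : List String) (data_points : List (List (String × List (String × Int)))), Dom_get_fields_without_data fields_to_verify data_points → Pre_get_fields_without_data fields_to_verify data_points → Spec_get_fields_without_data fields_to_verify data_points (get_fields_without_data fields_to_verify data_points)

-- ===== LEMMAS AND PROOFS =====

-- one data point's keep-predicate
def pvKeep1 (data_point : List (String × List (String × Int))) (field : String) : Bool :=
  !(decide (0 < pvBoostVal data_point field))

lemma pvInnerA_spec (data_point : List (String × List (String × Int))) :
    ∀ (sn acc : List String), (acc ++ sn).Nodup →
      pvInnerA data_point sn (acc ++ sn) =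
        if acc ++ sn.filter (pvKeep1 data_point) = [] ∧ sn ≠ [] then none
        else some (acc ++ sn.filter (pvKeep1 data_point)) := by
  intro sn
  induction sn with
  | nil => intro acc h; simp [pvInnerA]
  | cons f rest ih =>
    intro acc h
    have hf_acc : f ∉ acc := by
      intro hmem
      exact (List.disjoint_of_nodup_append h) hmem (by simp)
    have hmid : (f :: (acc ++ rest)).Nodup := List.nodup_middle.mp h
    have hrest : (acc ++ rest).Nodup := hmid.of_cons
    have hf_rest : f ∉ rest := by
      have := hmid
      simp at this
      tauto
    by_cases hb : 0 < pvBoostVal data_point f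
    · -- removed
      have h1 : acc.filter (fun y => !(y == f)) = acc :=
        List.filter_eq_self.mpr (by intro a ha; simp; intro e; exact hf_acc (e ▸ ha))
      have h2 : rest.filter (fun y => !(y == f)) = rest :=
        List.filter_eq_self.mpr (by intro a ha; simp; intro e; exact hf_rest (e ▸ ha))
      have hdisc : PySem.Set.discard (acc ++ f :: rest) f = acc ++ rest := by
        simp [PySem.Set.discard, List.filter_append, h1, h2]
      have hkeep : pvKeep1 data_point f = false := by simp [pvKeep1, hb]
      simp only [pvInnerA, if_pos hb, hdisc]
      by_cases hz : PySem.Set.len (acc ++ rest) = 0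
      · have hnil : acc = [] ∧ rest = [] := by
          simp [PySem.Set.len] at hz
          constructor <;> (apply List.eq_nil_of_length_eq_zero; omega)
        obtain ⟨ha0, hr0⟩ := hnil
        subst ha0; subst hr0
        simp [hkeep]
      · rw [if_neg hz, ih acc hrest]
        have hne : ¬ (acc ++ rest.filter (pvKeep1 data_point) = [] ∧ rest = []) := by
          rintro ⟨hh1, hh2⟩
          subst hh2
          simp at hh1
          subst hh1
          exact hz rfl
        simp only [List.filter_cons, hkeep]
        by_cases hc : acc ++ rest.filter (pvKeep1 data_point) = [] ∧ rest ≠ []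
        · rw [if_pos hc, if_pos ⟨hc.1, by simp⟩]
        · rw [if_neg hc, if_neg (by rintro ⟨hh1, -⟩; exact hc ⟨hh1, fun hh2 => hne ⟨hh1, hh2⟩⟩)]
          simp
    · -- kept
      have hkeep : pvKeep1 data_point f = true := by simp [pvKeep1, hb]
      have hstep : pvInnerA data_point (f :: rest) (acc ++ f :: rest)
          = pvInnerA data_point rest ((acc ++ [f]) ++ rest) := by
        simp only [pvInnerA, if_neg hb]
        rw [List.append_cons]
      rw [hstep, ih (acc ++ [f]) (by rw [← List.append_cons]; exact h)]
      have hne1 : (acc ++ [f]) ++ rest.filter (pvKeep1 data_point) ≠ [] := by simp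
      have hne2 : acc ++ (f :: rest).filter (pvKeep1 data_point) ≠ [] := by
        simp [hkeep]
      rw [if_neg (by rintro ⟨h1, -⟩; exact hne1 h1), if_neg (by rintro ⟨h1, -⟩; exact hne2 h1)]
      simp [hkeep]

lemma pvOuterA_spec :
    ∀ (dps : List (List (String × List (String × Int)))) (s : PySem.Set String), s.Nodup →
      pvOuterA dps s = s.filter (fun field => !(dps.any (fun dp => decide (0 < pvBoostVal dp field)))) := by
  intro dps
  induction dps with
  | nil => intro s _; simp [pvOuterA]
  | cons dp rest ih =>
    intro s hnd
    have hinner := pvInnerA_spec dp s [] (by simpa using hnd)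
    simp only [List.nil_append] at hinner
    have hsub : ∀ field ∈ s, pvKeep1 dp field = false →
        (!( (dp :: rest).any (fun d => decide (0 < pvBoostVal d field)))) = false := by
      intro field _ hk
      simp [pvKeep1] at hk
      simp [List.any_cons, hk]
    by_cases hc : s.filter (pvKeep1 dp) = [] ∧ s ≠ []
    · -- early 'return []'
      simp only [pvOuterA, hinner, if_pos hc]
      symm
      rw [List.filter_eq_nil_iff]
      intro field hmem
      have hk : pvKeep1 dp field = false := by
        have := (List.filter_eq_nil_iff.mp hc.1) field hmem
        simpa using this
      simp [pvKeep1] at hk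
      simp [List.any_cons, hk]
    · simp only [pvOuterA, hinner, if_neg hc]
      rw [ih (s.filter (pvKeep1 dp)) (hnd.filter _)]
      rw [List.filter_filter]
      apply List.filter_congr
      intro field _
      simp [pvKeep1, List.any_cons]
      exact Bool.and_comm _ _

-- ===== VERDICT (by name: the statement is the Claim_ definition above) =====
theorem get_fields_without_data_spec : Claim_equal_get_fields_without_data := by
  intro fields_to_verify data_points _ _
  unfold Spec_get_fields_without_data get_fields_without_data get_fields_without_data_alt
  exact pvOuterA_spec data_points (PySem.Set.ofList fields_to_verify) (PySem.Set.nodup_ofList _)
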